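-- pv_equiv track=rewrite | github.com/KirillSenkov/RE | main.py | merge_doubles
-- ===== SOURCE A (Python) =====
-- def merge_doubles(p_lst: list):
--     headers = []
--     for header in p_lst.pop(0):
--         headers.append(header)
--     sorted_lst = sorted(p_lst, key=lambda x:x[0])
--     prev_row = ['']
--     result = []
--     for row in sorted_lst:
--         if prev_row[0] == row[0]:
--             del result[len(result) - 1]
--             result.append([(row[0] or prev_row[0]),
--                            (row[1] or prev_row[1]),
--                            (row[2] or prev_row[2]),
--                            (row[3] or prev_row[3]),
--                            (row[4] or prev_row[4]),
--                            (row[5] or prev_row[5]),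
--                            (row[6] or prev_row[6]),
--                           ])
--         else:
--             result.append(row)
--         prev_row = row
--     result.insert(0, headers)
--     return result
-- ===== SOURCE B (Python) =====
-- def merge_doubles(p_lst: list):
--     headers = list(p_lst.pop(0))
--     # One pass over the unsorted rows building a hash index keyed by row[0]
--     # that keeps only the last two occurrences of each key, then emit the
--     # distinct keys in sorted order.  The inner structure of A (sort all rows,
--     # scan with a previous-row register, delete-and-reappend) disappears: only
--     # the distinct keys are sorted.
--     pairs = {}
--     for row in p_lst:
--         k = row[0]
--         prev = pairs.get(k)
--         pairs[k] = (row, prev[0] if prev is not None else None)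
--     out = [headers]
--     for k in sorted(pairs):
--         last, prev = pairs[k]
--         if prev is None:
--             out.append(last)
--         else:
--             out.append([last[i] or prev[i] for i in range(7)])
--     return out
-- ===== Notes on version B (the rewrite author's own statement) =====
-- stated objective: alternative
-- what changed: Instead of sorting all rows and scanning them with a previous-row register and delete-last-reappend, B makes one pass over the unsorted rows building a hash index keyed by row[0] that keeps only the last two occurrences per key, then emits the distinct keys in sorted order (singleton key: the row unchanged; otherwise the 7-column or-merge of the last two occurrences); only the distinct keys are sorted.
import Mathlib
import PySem

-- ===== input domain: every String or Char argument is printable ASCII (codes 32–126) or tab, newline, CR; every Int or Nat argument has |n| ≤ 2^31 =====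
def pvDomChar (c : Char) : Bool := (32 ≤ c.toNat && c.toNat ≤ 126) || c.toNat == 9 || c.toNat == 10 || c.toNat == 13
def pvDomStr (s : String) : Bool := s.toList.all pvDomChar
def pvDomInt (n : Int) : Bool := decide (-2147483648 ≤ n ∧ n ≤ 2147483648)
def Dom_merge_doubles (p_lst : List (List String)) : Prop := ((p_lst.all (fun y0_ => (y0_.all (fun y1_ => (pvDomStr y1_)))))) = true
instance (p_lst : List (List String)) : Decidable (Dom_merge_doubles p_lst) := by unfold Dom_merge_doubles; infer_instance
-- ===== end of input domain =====

-- B replaces A's sort-all-rows-then-scan (previous-row register, delete-last-and-reappend) by one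
-- pass over the UNSORTED rows building a hash index keyed by row[0] that keeps the last two
-- occurrences per key, then emits the distinct keys in sorted order; both Pythons pop the header
-- off p_lst in place — the equivalence proved here is about the return value (B mutates the same).

-- ===== PORT A =====
-- x[0]   (the sort key / key comparison): rows are nonempty under Pre_, so headD "" is exact
def pvKey (r : List String) : String := r.headD ""
-- Python's `x or y` on strings: first truthy (nonempty) operand
def pvOr (a b : String) : String := if a == "" then b else a
-- row[i] or prev_row[i] for the seven explicit entries; indices are in range under Pre_,
-- so pyGetD with default "" is exact there
def mergePairA (row prev : List String) : List String :=
  [pvOr (PySem.List.pyGetD row 0 "") (PySem.List.pyGetD prev 0 ""),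
   pvOr (PySem.List.pyGetD row 1 "") (PySem.List.pyGetD prev 1 ""),
   pvOr (PySem.List.pyGetD row 2 "") (PySem.List.pyGetD prev 2 ""),
   pvOr (PySem.List.pyGetD row 3 "") (PySem.List.pyGetD prev 3 ""),
   pvOr (PySem.List.pyGetD row 4 "") (PySem.List.pyGetD prev 4 ""),
   pvOr (PySem.List.pyGetD row 5 "") (PySem.List.pyGetD prev 5 ""),
   pvOr (PySem.List.pyGetD row 6 "") (PySem.List.pyGetD prev 6 "")]
-- the `for row in sorted_lst` loop with its prev_row / result state; `del result[-1]` is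
-- dropLast (result is nonempty whenever the branch fires under Pre_)
def mdLoop : List String → List (List String) → List (List String) → List (List String)
  | _, result, [] => result
  | prev, result, row :: rest =>
    if pvKey prev == pvKey row then
      mdLoop row (result.dropLast ++ [mergePairA row prev]) rest
    else
      mdLoop row (result ++ [row]) rest
-- p_lst.pop(0) raises IndexError on []: excluded by Pre_, the port returns [] there
def merge_doubles (p_lst : List (List String)) : List (List String) :=
  match p_lst with
  | [] => []
  | hd :: tl => hd :: mdLoop [""] [] (PySem.List.sorted tl pvKey false)

-- ===== PORT B =====
-- pairs[k] = (row, prev[0] if prev is not None else None), one insert per row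
def bBuild (rows : List (List String)) :
    PySem.Dict String (List String × Option (List String)) :=
  rows.foldl (fun d row => d.insert (pvKey row) (row, (d.get? (pvKey row)).map (·.1)))
    PySem.Dict.empty
-- [last[i] or prev[i] for i in range(7)]
def mergePairB (last prev : List String) : List String :=
  (PySem.List.pyRange 0 7 1).map
    (fun i => pvOr (PySem.List.pyGetD last i "") (PySem.List.pyGetD prev i ""))
-- the body of `for k in sorted(pairs)`: pairs[k] never misses (k is a key), so getD is exact
def bOut (d : PySem.Dict String (List String × Option (List String))) (k : String) :
    List String :=
  match (d.getD k ([], none)).2 with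
  | none => (d.getD k ([], none)).1
  | some prev => mergePairB (d.getD k ([], none)).1 prev
-- p_lst.pop(0) raises IndexError on []: excluded by Pre_, the port returns [] there
def merge_doubles_alt (p_lst : List (List String)) : List (List String) :=
  match p_lst with
  | [] => []
  | hd :: tl =>
    hd :: (PySem.List.sorted (bBuild tl).keys (fun s => s) false).map (bOut (bBuild tl))

-- ===== PRECONDITION & SPEC =====
-- Pre_ is exactly the set of inputs on which the Python A returns: p_lst nonempty (pop(0)
-- raises IndexError on []), every data row nonempty with nonempty first cell (x[0] raises on
-- [], and a '' key matches the initial prev_row [''] making `del result[-1]` raise on the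
-- empty result), and for each pair of CONSECUTIVE occurrences of the same key among the data
-- rows (adjacent in the stable-sorted order A merges over) the later row has the 7 merged
-- columns and the earlier row is long enough wherever the later row's cell is ''
-- (otherwise row[i]/prev_row[i] raises IndexError).
def Pre_merge_doubles (p_lst : List (List String)) : Prop :=
  p_lst ≠ [] ∧ (∀ r ∈ p_lst.tail, r ≠ [] ∧ pvKey r ≠ "") ∧
  (∀ j, j < p_lst.tail.length → ∀ i, i < j →
    pvKey (p_lst.tail.getD i []) = pvKey (p_lst.tail.getD j []) →
    (∀ k, k < j → i < k → pvKey (p_lst.tail.getD k []) ≠ pvKey (p_lst.tail.getD j [])) →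
    (7 ≤ (p_lst.tail.getD j []).length ∧
     ∀ m : Nat, m < 7 → 1 ≤ m → (p_lst.tail.getD j []).getD m "" = "" →
       m < (p_lst.tail.getD i []).length))
instance (p_lst : List (List String)) : Decidable (Pre_merge_doubles p_lst) := by
  unfold Pre_merge_doubles
  refine @instDecidableAnd _ _ ?_ (@instDecidableAnd _ _ ?_ ?_)
  · infer_instance
  · infer_instance
  · exact @Nat.decidableBallLT _ _ (fun j hj =>
      @Nat.decidableBallLT _ _ (fun i hi =>
        @instDecidableForall _ _ inferInstance
          (@instDecidableForall _ _
            (@Nat.decidableBallLT _ _ (fun k hk => inferInstance))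
            (@instDecidableAnd _ _ inferInstance
              (@Nat.decidableBallLT _ _ (fun m hm => inferInstance))))))

def pvWitness_merge_doubles : List (List String) :=
  [["h1", "h2"], ["a", "1", "2", "3", "4", "5", "6"], ["a", "", "x", "", "y", "", "z"], ["b"]]

def Spec_merge_doubles (p_lst : List (List String)) (out : List (List String)) : Prop := out = merge_doubles_alt p_lst
instance (p_lst : List (List String)) (out : List (List String)) : Decidable (Spec_merge_doubles p_lst out) := by unfold Spec_merge_doubles; infer_instance

-- ===== CLAIM (what is proved, stated in full; the proofs are below) =====
def Claim_equal_merge_doubles : Prop := ∀ (p_lst : List (List String)), Dom_merge_doubles p_lst → Pre_merge_doubles p_lst → Spec_merge_doubles p_lst (merge_doubles p_lst)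

-- ===== LEMMAS AND PROOFS =====

-- the key-k row filter both characterisations are reduced to
def keyFilt (k : String) (l : List (List String)) : List (List String) :=
  l.filter (fun r => pvKey r == k)

-- ---- groups of the sorted list (proof-side description of A's scan) ----
def takeRun (k : String) : List (List String) → List (List String) × List (List String)
  | [] => ([], [])
  | r :: rs =>
    if pvKey r == k then
      let p := takeRun k rs
      (r :: p.1, p.2)
    else ([], r :: rs)

theorem takeRun_snd_length (k : String) : ∀ rs : List (List String), (takeRun k rs).2.length ≤ rs.length := by
  intro rs
  induction rs with
  | nil => simp [takeRun]
  | cons r rs ih =>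
    simp only [takeRun]
    split
    · exact Nat.le_succ_of_le ih
    · simp

def pyGroups : List (List String) → List (List (List String))
  | [] => []
  | r :: rs => (r :: (takeRun (pvKey r) rs).1) :: pyGroups (takeRun (pvKey r) rs).2
  termination_by l => l.length
  decreasing_by
    simpa using Nat.lt_succ_of_le (takeRun_snd_length (pvKey r) rs)

-- the value A's scan leaves for one group
def gOut (g : List (List String)) : List String :=
  if g.length == 1 then g.headD []
  else mergePairB (PySem.List.pyGetD g (-1) []) (PySem.List.pyGetD g (-2) [])

-- what A's loop leaves as the last result entry while inside one key group
def contOutD : List String → List String → List (List String) → List String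
  | _, x, [] => x
  | prev, _, r :: rs => contOutD r (mergePairA r prev) rs

theorem mergePairB_eq (l p : List String) : mergePairB l p = mergePairA l p := rfl

theorem takeRun_append (k : String) : ∀ rs : List (List String), (takeRun k rs).1 ++ (takeRun k rs).2 = rs := by
  intro rs
  induction rs with
  | nil => simp [takeRun]
  | cons r rs ih =>
    simp only [takeRun]
    split
    · simpa using ih
    · simp

theorem takeRun_fst_key (k : String) : ∀ rs : List (List String), ∀ r ∈ (takeRun k rs).1, pvKey r = k := by
  intro rs
  induction rs with
  | nil => simp [takeRun]
  | cons r rs ih =>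
    simp only [takeRun]
    split
    · rename_i h
      intro r' hr'
      rcases List.mem_cons.mp hr' with hr' | hr'
      · subst hr'; exact eq_of_beq h
      · exact ih r' hr'
    · simp

theorem takeRun_snd_head (k : String) :
    ∀ rs : List (List String), ∀ r ∈ (takeRun k rs).2.head?, pvKey r ≠ k := by
  intro rs
  induction rs with
  | nil => simp [takeRun]
  | cons r rs ih =>
    simp only [takeRun]
    split
    · exact ih
    · rename_i h
      intro r' hr'
      simp only [List.head?_cons, Option.mem_def, Option.some.injEq] at hr'
      subst hr'
      simpa using h

-- A's loop through one key group, with a pending last result entry x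
theorem mdLoop_group (g : List (List String)) :
    ∀ (rest : List (List String)) (prev : List String) (acc : List (List String)) (x : List String),
    (∀ r ∈ g, pvKey r = pvKey prev) →
    mdLoop prev (acc ++ [x]) (g ++ rest) =
      mdLoop (g.getLastD prev) (acc ++ [contOutD prev x g]) rest := by
  induction g with
  | nil => intro rest prev acc _ _; simp [contOutD]
  | cons r rs ih =>
    intro rest prev acc x h
    have hk : pvKey r = pvKey prev := h r (by simp)
    simp only [List.cons_append, mdLoop, hk.symm, BEq.rfl, if_pos, List.dropLast_concat]
    rw [List.getLastD_cons]
    have hc : contOutD prev x (r :: rs) = contOutD r (mergePairA r prev) rs := rfl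
    rw [hc]
    exact ih rest r acc (mergePairA r prev)
      (fun r' hr' => (h r' (by simp [hr'])).trans hk.symm)

-- the last result entry of a ≥2-row group is mergePairA (last row) (second-to-last row)
theorem contOutD_eq (a : List (List String)) :
    ∀ (prev x : List String), a ≠ [] →
    contOutD prev x a =
      mergePairA ((prev :: a).getLastD []) ((prev :: a).dropLast.getLastD []) := by
  induction a with
  | nil => intro _ _ h; exact absurd rfl h
  | cons r rs ih =>
    intro prev x _
    cases rs with
    | nil => simp [contOutD]
    | cons r2 rs2 =>
      have := ih r (mergePairA r prev) (by simp)
      simp only [contOutD] at this ⊢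
      rw [this]
      simp [List.dropLast_cons₂]

theorem gOut_cons (r : List String) (a : List (List String)) (h : ∀ r' ∈ a, pvKey r' = pvKey r) :
    gOut (r :: a) = contOutD r r a := by
  cases a with
  | nil => simp [gOut, contOutD]
  | cons r2 rs =>
    rw [contOutD_eq (r2 :: rs) r r (by simp)]
    have h1 : PySem.List.pyGetD (r :: r2 :: rs) (-1) ([] : List String)
        = (r :: r2 :: rs).getLast (by simp) :=
      PySem.List.pyGetD_neg_one _ _ (by simp)
    have h2 : PySem.List.pyGetD (r :: r2 :: rs) (-2) ([] : List String)
        = (r :: r2 :: rs)[(r :: r2 :: rs).length - 2]'(by simp) := by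
      rw [PySem.List.pyGetD_neg_ofNat _ 2 _ (by omega) (by simp)]
      rfl
    have hcond : ¬(((r :: r2 :: rs).length == 1) = true) := by simp
    simp only [gOut]
    rw [if_neg hcond, mergePairB_eq, h1, h2]
    congr 1
    · have hdne : (r :: r2 :: rs).dropLast ≠ [] := by
        have : (r :: r2 :: rs).dropLast.length = rs.length + 1 := by simp
        exact List.ne_nil_of_length_pos (by omega)
      rw [List.getLastD_eq_getLast?, List.getLast?_eq_some_getLast hdne, Option.getD_some,
          List.getLast_eq_getElem, List.getElem_dropLast]
      congr 1
      simp

-- A's whole loop equals the per-group outputs, whenever the first key differs from prev's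
theorem mdLoop_eq_groups (n : Nat) :
    ∀ (s : List (List String)), s.length ≤ n →
    ∀ (prev : List String) (acc : List (List String)),
    (∀ r ∈ s.head?, pvKey r ≠ pvKey prev) →
    mdLoop prev acc s = acc ++ (pyGroups s).map gOut := by
  induction n with
  | zero =>
    intro s hs prev acc _
    have : s = [] := List.length_eq_zero_iff.mp (Nat.le_zero.mp hs)
    subst this
    simp [mdLoop, pyGroups]
  | succ n ih =>
    intro s hs prev acc hhd
    cases s with
    | nil => simp [mdLoop, pyGroups]
    | cons r rs =>
      have hk : pvKey r ≠ pvKey prev := hhd r (by simp)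
      have hbeq : (pvKey prev == pvKey r) = false := by
        simp [beq_eq_false_iff_ne]
        exact fun h => hk h.symm
      simp only [mdLoop]
      rw [if_neg (by simp [hbeq])]
      generalize hA : (takeRun (pvKey r) rs).1 = a at *
      generalize hB : (takeRun (pvKey r) rs).2 = b at *
      have hsplit : a ++ b = rs := by rw [← hA, ← hB]; exact takeRun_append (pvKey r) rs
      have hkeys : ∀ r' ∈ a, pvKey r' = pvKey r := by
        intro r' hr'; exact takeRun_fst_key (pvKey r) rs r' (hA ▸ hr')
      have hbh : ∀ r' ∈ b.head?, pvKey r' ≠ pvKey r := by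
        intro r' hr'; exact takeRun_snd_head (pvKey r) rs r' (hB ▸ hr')
      have hgrp := mdLoop_group a b r acc r hkeys
      have hlast : pvKey (a.getLastD r) = pvKey r := by
        rcases List.mem_cons.mp (List.getLastD_mem_cons (l := a) (a := r)) with hc | hc
        · rw [hc]
        · exact hkeys _ hc
      have hblen : b.length ≤ n := by
        have h1 : b.length ≤ rs.length := hB ▸ takeRun_snd_length (pvKey r) rs
        have h2 : rs.length ≤ n := by simpa using Nat.le_of_succ_le_succ hs
        omega
      have hpg : pyGroups (r :: rs) = (r :: a) :: pyGroups b := by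
        rw [pyGroups, hA, hB]
      rw [show mdLoop r (acc ++ [r]) rs = mdLoop (a.getLastD r) (acc ++ [contOutD r r a]) b from by
        rw [← hsplit]; exact hgrp]
      rw [ih b hblen (a.getLastD r) _ (fun r' hr' => by rw [hlast]; exact hbh r' hr')]
      rw [hpg]
      have hout : contOutD r r a = gOut (r :: a) := (gOut_cons r a hkeys).symm
      simp [hout]

-- ---- stability of the sort: filtering one key commutes with sorting ----
theorem filter_insertBy (k : String) (x : List String) :
    ∀ acc : List (List String), acc.Pairwise (fun a b => pvKey a ≤ pvKey b) →
    keyFilt k (PySem.List.insertBy (fun a b => decide (pvKey a < pvKey b)) x acc) =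
      keyFilt k acc ++ if pvKey x == k then [x] else [] := by
  intro acc
  induction acc with
  | nil => intro _; simp [keyFilt, PySem.List.insertBy, List.filter_singleton]
  | cons y ys ih =>
    intro h
    simp only [PySem.List.insertBy]
    split
    · rename_i hlt
      have hlt' : pvKey x < pvKey y := of_decide_eq_true hlt
      by_cases hx : pvKey x == k
      · have hxk : pvKey x = k := eq_of_beq hx
        have hnil : keyFilt k (y :: ys) = [] := by
          rw [keyFilt, List.filter_eq_nil_iff]
          intro z hz
          have hyz : pvKey y ≤ pvKey z := by
            rcases List.mem_cons.mp hz with hz | hz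
            · subst hz; exact le_refl _
            · exact (List.pairwise_cons.mp h).1 z hz
          simp only [beq_iff_eq]
          intro hzk
          rw [← hxk] at hzk
          exact absurd (hzk ▸ hyz) (not_le_of_gt hlt')
        simp only [keyFilt, List.filter_cons] at hnil ⊢
        simp only [hx, if_pos]
        rw [hnil]
        simp
      · simp only [keyFilt, List.filter_cons] at ih ⊢
        simp [hx]
    · have := ih (List.Pairwise.of_cons h)
      simp only [keyFilt, List.filter_cons] at this ⊢
      rw [this]
      split <;> simp

theorem filter_foldl_insertBy (k : String) :
    ∀ (tl acc : List (List String)), acc.Pairwise (fun a b => pvKey a ≤ pvKey b) →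
    keyFilt k (tl.foldl (fun acc x =>
        PySem.List.insertBy (fun a b => decide (pvKey a < pvKey b)) x acc) acc) =
      keyFilt k acc ++ keyFilt k tl := by
  intro tl
  induction tl with
  | nil => intro acc _; simp [keyFilt]
  | cons x tl ih =>
    intro acc h
    simp only [List.foldl_cons]
    rw [ih _ (PySem.List.insertBy_pairwise_le pvKey x acc h), filter_insertBy k x acc h]
    simp only [keyFilt, List.filter_cons]
    split <;> simp

theorem sorted_keyFilt (tl : List (List String)) (k : String) :
    keyFilt k (PySem.List.sorted tl pvKey false) = keyFilt k tl := by
  rw [PySem.List.sorted_eq_foldl_insertBy]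
  simpa [keyFilt] using filter_foldl_insertBy k tl [] (by simp)

-- ---- the dict built by B holds the last two occurrences of each key ----
theorem bBuild_get? (tl : List (List String)) (k : String) :
    (bBuild tl).get? k =
      (keyFilt k tl).getLast?.map (fun last => (last, (keyFilt k tl).dropLast.getLast?)) := by
  induction tl using List.reverseRecOn with
  | nil => simp [bBuild, keyFilt, PySem.Dict.get?_empty]
  | append_singleton l r ih =>
    have hstep : bBuild (l ++ [r]) =
        (bBuild l).insert (pvKey r) (r, ((bBuild l).get? (pvKey r)).map (·.1)) := by
      simp [bBuild, List.foldl_append]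
    rw [hstep]
    by_cases hk : pvKey r = k
    · subst hk
      rw [PySem.Dict.get?_insert_self, ih]
      have hf : keyFilt (pvKey r) (l ++ [r]) = keyFilt (pvKey r) l ++ [r] := by
        simp [keyFilt, List.filter_append]
      rw [hf]
      simp
      cases hfl : (keyFilt (pvKey r) l).getLast? <;> simp
    · rw [PySem.Dict.get?_insert_of_ne _ _ (fun h => hk h.symm), ih]
      have hf : keyFilt k (l ++ [r]) = keyFilt k l := by
        simp [keyFilt, List.filter_append, hk]
      rw [hf]

theorem bBuild_keys (tl : List (List String)) :
    (bBuild tl).keys = PySem.Set.ofList (tl.map pvKey) := by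
  rw [bBuild, PySem.Dict.keys_foldl_insert_key tl pvKey
    (fun d row => (row, (d.get? (pvKey row)).map (·.1))) PySem.Dict.empty]
  simp [PySem.Dict.keys_empty, PySem.Set.update_nil_left]

theorem bBuild_keys_nodup (tl : List (List String)) : (bBuild tl).keys.Nodup := by
  rw [bBuild]
  exact PySem.Dict.nodup_keys_foldl_insert_key tl pvKey _ PySem.Dict.empty (by simp [PySem.Dict.keys_empty])

-- ---- groups of a sorted list are the key filters; group keys strictly increase ----
def gkey (g : List (List String)) : String := pvKey (g.headD [])

theorem run_facts (r : List String) (rs : List (List String))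
    (h : (r :: rs).Pairwise (fun a b => pvKey a ≤ pvKey b)) :
    (∀ x ∈ (takeRun (pvKey r) rs).2, pvKey r < pvKey x) ∧
    (takeRun (pvKey r) rs).2.Pairwise (fun a b => pvKey a ≤ pvKey b) := by
  have hsplit := takeRun_append (pvKey r) rs
  have hsub : (takeRun (pvKey r) rs).2.Sublist rs := by
    conv_rhs => rw [← hsplit]
    exact List.sublist_append_right _ _
  have hpb : (takeRun (pvKey r) rs).2.Pairwise (fun a b => pvKey a ≤ pvKey b) :=
    ((List.pairwise_cons.mp h).2).sublist hsub
  refine ⟨?_, hpb⟩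
  cases hb : (takeRun (pvKey r) rs).2 with
  | nil => simp
  | cons hh tt =>
    have hmemh : hh ∈ rs := by
      rw [← hsplit, hb]; exact List.mem_append_right _ (by simp)
    have hle : pvKey r ≤ pvKey hh := (List.pairwise_cons.mp h).1 hh hmemh
    have hne : pvKey hh ≠ pvKey r := by
      have := takeRun_snd_head (pvKey r) rs
      rw [hb] at this
      exact this hh (by simp)
    have hlt : pvKey r < pvKey hh := lt_of_le_of_ne hle (fun e => hne e.symm)
    intro x hx
    rcases List.mem_cons.mp hx with hx | hx
    · subst hx; exact hlt
    · have : pvKey hh ≤ pvKey x := by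
        have hpb' := hb ▸ hpb
        exact (List.pairwise_cons.mp hpb').1 x hx
      exact lt_of_lt_of_le hlt this

theorem pyGroups_filter (n : Nat) :
    ∀ s : List (List String), s.length ≤ n → s.Pairwise (fun a b => pvKey a ≤ pvKey b) →
    ∀ g ∈ pyGroups s, g ≠ [] ∧ g = keyFilt (gkey g) s := by
  induction n with
  | zero =>
    intro s hs _ g hg
    have : s = [] := List.length_eq_zero_iff.mp (Nat.le_zero.mp hs)
    subst this
    simp [pyGroups] at hg
  | succ n ih =>
    intro s hs hp g hg
    cases s with
    | nil => simp [pyGroups] at hg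
    | cons r rs =>
      obtain ⟨hgt, hpb⟩ := run_facts r rs hp
      generalize hA : (takeRun (pvKey r) rs).1 = a at *
      generalize hB : (takeRun (pvKey r) rs).2 = b at *
      have hsplit : a ++ b = rs := by rw [← hA, ← hB]; exact takeRun_append (pvKey r) rs
      have hka : ∀ x ∈ a, pvKey x = pvKey r := by
        intro x hx; exact takeRun_fst_key (pvKey r) rs x (hA ▸ hx)
      rw [pyGroups, hA, hB] at hg
      rcases List.mem_cons.mp hg with hg | hg
      · subst hg
        refine ⟨by simp, ?_⟩
        have hgk : gkey (r :: a) = pvKey r := by simp [gkey]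
        rw [hgk, keyFilt, ← hsplit]
        simp only [List.filter_cons, List.filter_append, beq_self_eq_true]
        have hfa : a.filter (fun x => pvKey x == pvKey r) = a :=
          List.filter_eq_self.mpr (fun x hx => by simp [hka x hx])
        have hfb : b.filter (fun x => pvKey x == pvKey r) = [] :=
          List.filter_eq_nil_iff.mpr (fun x hx => by simp [(ne_of_gt (hgt x hx))])
        simp [hfa, hfb]
      · have hblen : b.length ≤ n := by
          have := hB ▸ takeRun_snd_length (pvKey r) rs
          have h2 : rs.length ≤ n := by simpa using Nat.le_of_succ_le_succ hs
          omega
        obtain ⟨hgne, hgeq⟩ := ih b hblen hpb g hg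
        refine ⟨hgne, ?_⟩
        have hgmem : gkey g ∈ b.map pvKey := by
          have hhead : g.headD [] ∈ g := by
            cases g with
            | nil => exact absurd rfl hgne
            | cons gh gt => simp
          have hsubb : ∀ y ∈ g, y ∈ b := by
            intro y hy
            rw [hgeq] at hy
            exact List.mem_of_mem_filter hy
          exact List.mem_map.mpr ⟨_, hsubb _ hhead, rfl⟩
        obtain ⟨x, hxb, hxk⟩ := List.mem_map.mp hgmem
        have hkgt : pvKey r < gkey g := hxk ▸ hgt x hxb
        have hstep : keyFilt (gkey g) (r :: rs) = keyFilt (gkey g) b := by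
          rw [keyFilt, keyFilt, ← hsplit]
          simp only [List.filter_cons, List.filter_append]
          have h1 : (pvKey r == gkey g) = false := by simp [ne_of_lt hkgt]
          have h2 : a.filter (fun x => pvKey x == gkey g) = [] :=
            List.filter_eq_nil_iff.mpr (fun x hx => by simp [hka x hx, ne_of_lt hkgt])
          simp [h1, h2]
        rw [hstep]
        exact hgeq

theorem pyGroups_keys_mem (n : Nat) :
    ∀ s : List (List String), s.length ≤ n →
    ∀ k, k ∈ (pyGroups s).map gkey ↔ k ∈ s.map pvKey := by
  induction n with
  | zero =>
    intro s hs k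
    have : s = [] := List.length_eq_zero_iff.mp (Nat.le_zero.mp hs)
    subst this
    simp [pyGroups]
  | succ n ih =>
    intro s hs k
    cases s with
    | nil => simp [pyGroups]
    | cons r rs =>
      generalize hA : (takeRun (pvKey r) rs).1 = a
      generalize hB : (takeRun (pvKey r) rs).2 = b
      have hsplit : a ++ b = rs := by rw [← hA, ← hB]; exact takeRun_append (pvKey r) rs
      have hka : ∀ x ∈ a, pvKey x = pvKey r := by
        intro x hx; exact takeRun_fst_key (pvKey r) rs x (hA ▸ hx)
      have hblen : b.length ≤ n := by
        have := hB ▸ takeRun_snd_length (pvKey r) rs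
        have h2 : rs.length ≤ n := by simpa using Nat.le_of_succ_le_succ hs
        omega
      rw [pyGroups, hA, hB]
      have hgk : gkey (r :: a) = pvKey r := by simp [gkey]
      simp only [List.map_cons, List.mem_cons, ih b hblen k, hgk, ← hsplit,
        List.map_append, List.mem_append, List.mem_map]
      constructor
      · rintro (h | ⟨x, hx, hxk⟩)
        · exact Or.inl h
        · exact Or.inr (Or.inr ⟨x, hx, hxk⟩)
      · rintro (h | ⟨x, hx, hxk⟩ | ⟨x, hx, hxk⟩)
        · exact Or.inl h
        · exact Or.inl (by rw [← hxk, hka x hx])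
        · exact Or.inr ⟨x, hx, hxk⟩

theorem pyGroups_keys_lt (n : Nat) :
    ∀ s : List (List String), s.length ≤ n → s.Pairwise (fun a b => pvKey a ≤ pvKey b) →
    ((pyGroups s).map gkey).Pairwise (· < ·) := by
  induction n with
  | zero =>
    intro s hs _
    have : s = [] := List.length_eq_zero_iff.mp (Nat.le_zero.mp hs)
    subst this
    simp [pyGroups]
  | succ n ih =>
    intro s hs hp
    cases s with
    | nil => simp [pyGroups]
    | cons r rs =>
      obtain ⟨hgt, hpb⟩ := run_facts r rs hp
      generalize hA : (takeRun (pvKey r) rs).1 = a at *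
      generalize hB : (takeRun (pvKey r) rs).2 = b at *
      have hblen : b.length ≤ n := by
        have := hB ▸ takeRun_snd_length (pvKey r) rs
        have h2 : rs.length ≤ n := by simpa using Nat.le_of_succ_le_succ hs
        omega
      rw [pyGroups, hA, hB]
      simp only [List.map_cons]
      rw [List.pairwise_cons]
      refine ⟨?_, ih b hblen hpb⟩
      intro k hk
      have : k ∈ b.map pvKey := (pyGroups_keys_mem n b hblen k).mp hk
      obtain ⟨x, hx, hxk⟩ := List.mem_map.mp this
      have hgk : gkey (r :: a) = pvKey r := by simp [gkey]
      rw [hgk, ← hxk]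
      exact hgt x hx

-- ---- each group's A-output equals B's output for its key ----
theorem gOut_eq_bOut (tl : List (List String)) (g : List (List String))
    (hg : g ≠ []) (hfilt : keyFilt (gkey g) tl = g) :
    gOut g = bOut (bBuild tl) (gkey g) := by
  have hget : (bBuild tl).get? (gkey g) =
      some (g.getLast hg, g.dropLast.getLast?) := by
    rw [bBuild_get?, hfilt, List.getLast?_eq_some_getLast hg]
    simp
  have hgetD : (bBuild tl).getD (gkey g) ([], none) = (g.getLast hg, g.dropLast.getLast?) :=
    PySem.Dict.getD_of_get?_eq_some _ _ hget
  cases g with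
  | nil => exact absurd rfl hg
  | cons gh gt =>
    cases gt with
    | nil =>
      rw [bOut, hgetD]
      simp [gOut]
    | cons g2 gt2 =>
      have hdne : (gh :: g2 :: gt2).dropLast ≠ [] := by
        have : (gh :: g2 :: gt2).dropLast.length = gt2.length + 1 := by simp
        exact List.ne_nil_of_length_pos (by omega)
      rw [bOut, hgetD]
      simp only [List.getLast?_eq_some_getLast hdne]
      rw [gOut]
      have hcond : ¬(((gh :: g2 :: gt2).length == 1) = true) := by simp
      rw [if_neg hcond]
      have h1 : PySem.List.pyGetD (gh :: g2 :: gt2) (-1) ([] : List String)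
          = (gh :: g2 :: gt2).getLast (by simp) :=
        PySem.List.pyGetD_neg_one _ _ (by simp)
      have h2 : PySem.List.pyGetD (gh :: g2 :: gt2) (-2) ([] : List String)
          = (gh :: g2 :: gt2)[(gh :: g2 :: gt2).length - 2]'(by simp) := by
        rw [PySem.List.pyGetD_neg_ofNat _ 2 _ (by omega) (by simp)]
        rfl
      rw [h1, h2]
      congr 1
      rw [List.getLast_eq_getElem, List.getElem_dropLast]
      congr 1
      simp

-- ===== VERDICT (by name: the statement is the Claim_ definition above) =====
theorem merge_doubles_spec : Claim_equal_merge_doubles := by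
  intro p_lst _ hpre
  obtain ⟨hne, hrows, _⟩ := hpre
  unfold Spec_merge_doubles
  cases p_lst with
  | nil => exact absurd rfl hne
  | cons hd tl =>
    simp only [merge_doubles, merge_doubles_alt]
    congr 1
    have hA := mdLoop_eq_groups (PySem.List.sorted tl pvKey false).length
      (PySem.List.sorted tl pvKey false) le_rfl [""] []
      (fun r hr => by
        have hmem : r ∈ PySem.List.sorted tl pvKey false := List.mem_of_mem_head? hr
        have : r ∈ tl := (PySem.List.mem_sorted _ _ _ _).mp hmem
        have := (hrows r (by simpa using this)).2
        simpa [pvKey] using this)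
    rw [hA]
    have hpair : (PySem.List.sorted tl pvKey false).Pairwise (fun a b => pvKey a ≤ pvKey b) :=
      PySem.List.sorted_pairwise tl pvKey
    have hnd1 : ((pyGroups (PySem.List.sorted tl pvKey false)).map gkey).Nodup :=
      (pyGroups_keys_lt _ _ le_rfl hpair).imp ne_of_lt
    have hsortk : PySem.List.sorted (bBuild tl).keys (fun s => s) false
        = (pyGroups (PySem.List.sorted tl pvKey false)).map gkey := by
      apply PySem.List.sorted_eq_of_perm_of_pairwise_lt
      · apply (List.perm_ext_iff_of_nodup hnd1 (bBuild_keys_nodup tl)).mpr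
        intro k
        rw [pyGroups_keys_mem _ _ le_rfl, bBuild_keys, PySem.Set.mem_ofList]
        simp [List.mem_map, PySem.List.mem_sorted]
      · exact pyGroups_keys_lt _ _ le_rfl hpair
    rw [hsortk, List.map_map]
    apply List.map_congr_left
    intro g hg
    obtain ⟨hgne, hgeq⟩ := pyGroups_filter _ _ le_rfl hpair g hg
    have hfilt : keyFilt (gkey g) tl = g := by
      rw [← sorted_keyFilt tl (gkey g), ← hgeq]
    simpa using gOut_eq_bOut tl g hgne hfilt
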